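-- pv_equiv track=rewrite | github.com/matthew4242/Comp_Sci_Portfolio | Data_Mining_Historical_Research/Code/sailor_record.py | order_dates
-- ===== SOURCE A (Python) =====
-- def order_dates(dates):
--     """
--     Order the date values and matchs ID for individual dates
--
--     args => dates - list[list] - [[ID, date]]
--     return => new_dates - list[list] - [[ordered_ID, date]]
--     """
--     # create date array
--     date_array = []
--     for d in dates:
--         date_array.append(d[1])
--     date_array.sort()
--     # reconnect id
--     new_dates = []
--     used_id = [] # make sure no replica ids produced
--     for da in date_array:
--         for d in dates:
--             if(da == d[1]):
--                 # make sure ID not already used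
--                 if(d[0] not in used_id):
--                     new_dates.append([d[0], d[1]])
--                     used_id.append(d[0])
--     return new_dates
-- ===== SOURCE B (Python) =====
-- def order_dates(dates):
--     """
--     Order the date values and matchs ID for individual dates
--
--     args => dates - list[list] - [[ID, date]]
--     return => new_dates - list[list] - [[ordered_ID, date]]
--     """
--     new_dates = []
--     seen = set()
--     for d in sorted(dates, key=lambda r: r[1]):
--         if d[0] not in seen:
--             seen.add(d[0])
--             new_dates.append([d[0], d[1]])
--     return new_dates
-- ===== Notes on version B (the rewrite author's own statement) =====
-- stated objective: faster
-- what changed: Replaced the sort of the date column plus a nested rescan of all records for every sorted date (with a linear 'used_id' list scan) by a single stable sort of the records keyed on the date followed by one pass that keeps the first record per id using a hash set.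
import Mathlib
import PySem

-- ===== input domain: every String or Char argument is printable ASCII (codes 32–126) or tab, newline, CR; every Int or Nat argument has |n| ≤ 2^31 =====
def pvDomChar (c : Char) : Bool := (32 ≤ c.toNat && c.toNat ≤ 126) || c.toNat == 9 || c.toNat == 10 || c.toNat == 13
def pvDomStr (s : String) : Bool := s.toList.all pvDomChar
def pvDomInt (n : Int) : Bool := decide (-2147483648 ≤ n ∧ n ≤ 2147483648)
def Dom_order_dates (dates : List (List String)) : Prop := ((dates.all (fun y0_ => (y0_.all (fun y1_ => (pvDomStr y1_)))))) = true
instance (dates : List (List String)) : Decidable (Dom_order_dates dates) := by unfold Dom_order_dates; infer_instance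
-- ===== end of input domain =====

-- B replaces A's sort of the date column plus a nested rescan of all records for
-- every sorted date (O(n^3)) by one stable sort of the records keyed on the date
-- followed by a single pass keeping the first record per id (objective: faster).

-- shared accessors: d[1] and d[0] (IndexError = none; Pre_ keeps records of length ≥ 2)
def pvKey (d : List String) : String := (PySem.List.pyGet? d 1).getD ""
def pvId (d : List String) : String := (PySem.List.pyGet? d 0).getD ""

-- ===== PORT A =====
def order_dates (dates : List (List String)) : List (List String) :=
  -- date_array = [d[1] for d in dates]; date_array.sort()
  let date_array := dates.foldl (fun acc d => acc ++ [pvKey d]) []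
  let date_array := PySem.List.sorted date_array (fun x => x)
  -- for da in date_array: for d in dates: …
  let r := date_array.foldl
    (fun (acc : List (List String) × List String) da =>
      dates.foldl
        (fun (acc2 : List (List String) × List String) d =>
          if da = pvKey d then
            if pvId d ∈ acc2.2 then acc2
            else (acc2.1 ++ [[pvId d, pvKey d]], acc2.2 ++ [pvId d])
          else acc2)
        acc)
    ([], [])
  r.1

-- ===== PORT B =====
def order_dates_alt (dates : List (List String)) : List (List String) :=
  -- for d in sorted(dates, key=lambda r: r[1]): if d[0] not in seen: …
  let r := (PySem.List.sorted dates pvKey).foldl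
    (fun (acc : List (List String) × PySem.Set String) d =>
      if PySem.Set.contains acc.2 (pvId d) then acc
      else (acc.1 ++ [[pvId d, pvKey d]], PySem.Set.add acc.2 (pvId d)))
    ([], PySem.Set.empty)
  r.1

-- ===== PRECONDITION & SPEC =====
-- Pre_ excludes exactly the inputs where Python A raises IndexError (a record with fewer than 2 fields).
def Pre_order_dates (dates : List (List String)) : Prop := ∀ d ∈ dates, 2 ≤ d.length
instance (dates : List (List String)) : Decidable (Pre_order_dates dates) := by unfold Pre_order_dates; infer_instance
def pvWitness_order_dates : List (List String) := [["a", "2"], ["b", "1"], ["a", "1"]]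

def Spec_order_dates (dates : List (List String)) (out : List (List String)) : Prop := out = order_dates_alt dates
instance (dates : List (List String)) (out : List (List String)) : Decidable (Spec_order_dates dates out) := by unfold Spec_order_dates; infer_instance

-- ===== CLAIM (what is proved, stated in full; the proofs are below) =====
def Claim_equal_order_dates : Prop := ∀ (dates : List (List String)), Dom_order_dates dates → Pre_order_dates dates → Spec_order_dates dates (order_dates dates)

-- ===== LEMMAS AND PROOFS =====

-- the common dedup-by-id step both loops perform on one record
def pvStep (acc : List (List String) × List String) (d : List String) :
    List (List String) × List String :=
  if pvId d ∈ acc.2 then acc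
  else (acc.1 ++ [[pvId d, pvKey d]], acc.2 ++ [pvId d])

-- B's loop body is pvStep (PySem.Set on String is a duplicate-free list)
lemma alt_eq_fold (dates : List (List String)) :
    order_dates_alt dates = ((PySem.List.sorted dates pvKey).foldl pvStep ([], [])).1 := by
  unfold order_dates_alt
  refine congrArg Prod.fst ?_
  refine PySem.List.foldl_congr_mem _ _ _ _ ?_
  intro acc d _
  by_cases h : pvId d ∈ acc.2 <;>
    simp [pvStep, PySem.Set.contains, PySem.Set.add, h]

lemma pvStep_mono (L : List (List String)) (st : List (List String) × List String)
    (x : String) (hx : x ∈ st.2) : x ∈ (L.foldl pvStep st).2 := by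
  induction L generalizing st with
  | nil => exact hx
  | cons d t ih =>
    refine ih _ ?_
    unfold pvStep
    split
    · exact hx
    · simpa using Or.inl hx

lemma pvStep_sat (L : List (List String)) (st : List (List String) × List String)
    (d : List String) (hd : d ∈ L) : pvId d ∈ (L.foldl pvStep st).2 := by
  induction L generalizing st with
  | nil => cases hd
  | cons e t ih =>
    rcases List.mem_cons.mp hd with rfl | hd
    · simp only [List.foldl_cons]
      refine pvStep_mono _ _ _ ?_
      unfold pvStep
      split
      · assumption
      · simp
    · exact ih _ hd

lemma foldl_fixpoint {α σ : Type} (f : σ → α → σ) (st : σ) (M : List α)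
    (h : ∀ d ∈ M, f st d = st) : M.foldl f st = st := by
  induction M with
  | nil => rfl
  | cons d t ih =>
    simp only [List.foldl_cons, h d (by simp)]
    exact ih (fun e he => h e (by simp [he]))

lemma pvStep_noop (L : List (List String)) (st : List (List String) × List String)
    (h : ∀ d ∈ L, pvId d ∈ st.2) : L.foldl pvStep st = st := by
  refine foldl_fixpoint _ _ _ (fun d hd => ?_)
  unfold pvStep
  simp [h d hd]


lemma insertBy_pairwise (x : List String) (acc : List (List String))
    (h : acc.Pairwise (fun a b => pvKey a ≤ pvKey b)) :
    (PySem.List.insertBy (fun a b => decide (pvKey a < pvKey b)) x acc).Pairwise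
      (fun a b => pvKey a ≤ pvKey b) := by
  induction acc with
  | nil => simp [PySem.List.insertBy]
  | cons y ys ih =>
    rcases List.pairwise_cons.mp h with ⟨hy, hys⟩
    by_cases hlt : pvKey x < pvKey y
    · rw [show PySem.List.insertBy (fun a b => decide (pvKey a < pvKey b)) x (y :: ys)
          = x :: y :: ys by simp [PySem.List.insertBy, hlt]]
      refine List.pairwise_cons.mpr ⟨?_, h⟩
      intro b hb
      rcases List.mem_cons.mp hb with rfl | hb
      · exact le_of_lt hlt
      · exact le_trans (le_of_lt hlt) (hy b hb)
    · rw [show PySem.List.insertBy (fun a b => decide (pvKey a < pvKey b)) x (y :: ys)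
          = y :: PySem.List.insertBy (fun a b => decide (pvKey a < pvKey b)) x ys
          by simp [PySem.List.insertBy, hlt]]
      refine List.pairwise_cons.mpr ⟨?_, ih hys⟩
      intro b hb
      rcases (PySem.List.mem_insertBy _ _ _ _).mp hb with rfl | hb
      · exact le_of_not_gt hlt
      · exact hy b hb

lemma insertBy_filter (k : String) (x : List String) (acc : List (List String))
    (h : acc.Pairwise (fun a b => pvKey a ≤ pvKey b)) :
    (PySem.List.insertBy (fun a b => decide (pvKey a < pvKey b)) x acc).filter
        (fun e => decide (k = pvKey e)) =
      acc.filter (fun e => decide (k = pvKey e)) ++ (if k = pvKey x then [x] else []) := by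
  induction acc with
  | nil => by_cases hk : k = pvKey x <;> simp [PySem.List.insertBy, hk]
  | cons y ys ih =>
    rcases List.pairwise_cons.mp h with ⟨hy, hys⟩
    by_cases hlt : pvKey x < pvKey y
    · rw [show PySem.List.insertBy (fun a b => decide (pvKey a < pvKey b)) x (y :: ys)
          = x :: y :: ys by simp [PySem.List.insertBy, hlt]]
      by_cases hk : k = pvKey x
      · have hnil : (y :: ys).filter (fun e => decide (k = pvKey e)) = [] := by
          refine List.filter_eq_nil_iff.mpr ?_
          intro b hb
          have : pvKey x < pvKey b := by
            rcases List.mem_cons.mp hb with rfl | hb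
            · exact hlt
            · exact lt_of_lt_of_le hlt (hy b hb)
          simp only [decide_eq_true_eq]
          intro hkb
          exact absurd (hk ▸ hkb : pvKey x = pvKey b) (ne_of_lt this)
        rw [List.filter_cons, hnil]
        simp [hk]
      · simp [List.filter_cons, hk]
    · rw [show PySem.List.insertBy (fun a b => decide (pvKey a < pvKey b)) x (y :: ys)
          = y :: PySem.List.insertBy (fun a b => decide (pvKey a < pvKey b)) x ys
          by simp [PySem.List.insertBy, hlt]]
      rw [List.filter_cons, ih hys, List.filter_cons]
      by_cases hky : k = pvKey y <;> simp [hky]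

lemma sorted_filter_stable (dates : List (List String)) (k : String) :
    (PySem.List.sorted dates pvKey).filter (fun e => decide (k = pvKey e)) =
      dates.filter (fun e => decide (k = pvKey e)) := by
  rw [PySem.List.sorted_eq_foldl_insertBy]
  suffices h : ∀ (l acc : List (List String)),
      acc.Pairwise (fun a b => pvKey a ≤ pvKey b) →
      (l.foldl (fun acc x => PySem.List.insertBy (fun a b => decide (pvKey a < pvKey b)) x acc) acc).filter
          (fun e => decide (k = pvKey e)) =
        acc.filter (fun e => decide (k = pvKey e)) ++ l.filter (fun e => decide (k = pvKey e)) by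
    simpa using h dates [] (by simp)
  intro l
  induction l with
  | nil => intro acc _; simp
  | cons x t ih =>
    intro acc hacc
    simp only [List.foldl_cons]
    rw [ih _ (insertBy_pairwise x acc hacc), insertBy_filter k x acc hacc, List.filter_cons]
    by_cases hk : k = pvKey x <;> simp [hk]

lemma pvStep_mem (acc : List (List String) × List String) (d : List String)
    (h : pvId d ∈ acc.2) : pvStep acc d = acc := by
  unfold pvStep
  rw [if_pos h]

lemma fold_const_fold (L : List (List String)) (st : List (List String) × List String)
    (hne : L ≠ []) :
    L.foldl (fun acc _ => L.foldl pvStep acc) st = L.foldl pvStep st := by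
  cases L with
  | nil => exact absurd rfl hne
  | cons d0 T' =>
    simp only [List.foldl_cons]
    have hsat : ∀ d ∈ d0 :: T', pvId d ∈ ((d0 :: T').foldl pvStep st).2 :=
      fun d hd => pvStep_sat _ st d hd
    simp only [List.foldl_cons] at hsat
    refine foldl_fixpoint _ _ _ (fun d _ => ?_)
    show T'.foldl pvStep (pvStep (T'.foldl pvStep (pvStep st d0)) d0) = T'.foldl pvStep (pvStep st d0)
    have h0 : pvStep (T'.foldl pvStep (pvStep st d0)) d0 = T'.foldl pvStep (pvStep st d0) :=
      pvStep_mem _ _ (hsat d0 (by simp))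
    have h1 : T'.foldl pvStep (T'.foldl pvStep (pvStep st d0)) = T'.foldl pvStep (pvStep st d0) :=
      pvStep_noop _ _ (fun e he => hsat e (by simp [he]))
    exact (congrArg (fun s => T'.foldl pvStep s) h0).trans h1

lemma main_fold : ∀ (n : Nat) (S : List (List String)) (G : String → List (List String)),
    S.length ≤ n →
    S.Pairwise (fun a b => pvKey a ≤ pvKey b) →
    (∀ d ∈ S, G (pvKey d) = S.filter (fun e => decide (pvKey d = pvKey e))) →
    ∀ st, S.foldl (fun acc d => (G (pvKey d)).foldl pvStep acc) st = S.foldl pvStep st := by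
  intro n
  induction n with
  | zero =>
    intro S G hlen _ _ st
    rw [List.length_eq_zero_iff.mp (Nat.le_zero.mp hlen)]
    rfl
  | succ n ih =>
    intro S G hlen hp hG st
    cases hS0 : S with
    | nil => rfl
    | cons d0 T =>
      subst hS0
      set p : List String → Bool := fun e => decide (pvKey d0 = pvKey e) with hpdef
      set A := (d0 :: T).takeWhile p with hAdef
      set B := (d0 :: T).dropWhile p with hBdef
      have hS : A ++ B = d0 :: T := List.takeWhile_append_dropWhile
      -- every element of A has key k0
      have hA : ∀ d ∈ A, pvKey d = pvKey d0 := by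
        intro d hd
        have := List.mem_takeWhile_imp hd
        simpa [hpdef, eq_comm] using this
      -- A starts with d0
      have hAcons : A = d0 :: T.takeWhile p := by
        rw [hAdef, List.takeWhile_cons_of_pos (by simp [hpdef])]
      -- pairwise split
      have hp' : (A ++ B).Pairwise (fun a b => pvKey a ≤ pvKey b) := by rw [hS]; exact hp
      rcases List.pairwise_append.mp hp' with ⟨hpA, hpB, hAB⟩
      have hd0A : d0 ∈ A := by rw [hAcons]; simp
      -- every element of B has key strictly above k0
      have hB : ∀ b ∈ B, pvKey d0 < pvKey b := by
        cases hBc : B with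
        | nil => simp
        | cons b0 B' =>
          have hb0 : p b0 = false := by
            have := List.head?_dropWhile_not p (d0 :: T)
            rw [← hBdef, hBc] at this
            simpa using this
          have hb0ne : pvKey d0 ≠ pvKey b0 := by simpa [hpdef] using hb0
          have hb0lt : pvKey d0 < pvKey b0 :=
            lt_of_le_of_ne (hAB d0 hd0A b0 (by rw [hBc]; simp)) hb0ne
          intro b hb
          rw [hBc] at hpB
          rcases List.mem_cons.mp hb with rfl | hb'
          · exact hb0lt
          · exact lt_of_lt_of_le hb0lt ((List.pairwise_cons.mp hpB).1 b hb')
      -- filtering S at key k0 yields A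
      have hfA : ∀ d ∈ A, (d0 :: T).filter (fun e => decide (pvKey d = pvKey e)) = A := by
        intro d hd
        rw [← hS, List.filter_append]
        have h1 : A.filter (fun e => decide (pvKey d = pvKey e)) = A :=
          List.filter_eq_self.mpr (fun b hb => by simp [hA b hb, hA d hd])
        have h2 : B.filter (fun e => decide (pvKey d = pvKey e)) = [] :=
          List.filter_eq_nil_iff.mpr (fun b hb => by
            simp only [decide_eq_true_eq]
            rw [hA d hd]
            exact ne_of_lt (hB b hb))
        rw [h1, h2, List.append_nil]
      -- filtering S at a key of B ignores A
      have hfB : ∀ d ∈ B, (d0 :: T).filter (fun e => decide (pvKey d = pvKey e)) =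
          B.filter (fun e => decide (pvKey d = pvKey e)) := by
        intro d hd
        rw [← hS, List.filter_append]
        have h1 : A.filter (fun e => decide (pvKey d = pvKey e)) = [] :=
          List.filter_eq_nil_iff.mpr (fun b hb => by
            simp only [decide_eq_true_eq]
            rw [hA b hb]
            exact (ne_of_lt (hB d hd)).symm)
        rw [h1, List.nil_append]
      -- unfold the fold over A ++ B
      rw [← hS, List.foldl_append, List.foldl_append]
      -- the fold of the outer loop over A
      have hGA : ∀ acc, ∀ d ∈ A, (G (pvKey d)).foldl pvStep acc = A.foldl pvStep acc := by
        intro acc d hd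
        rw [hG d (by rw [← hS]; exact List.mem_append_left _ hd), hfA d hd]
      have hAfold : A.foldl (fun acc d => (G (pvKey d)).foldl pvStep acc) st
          = A.foldl pvStep st := by
        rw [PySem.List.foldl_congr_mem A _ (fun acc d => A.foldl pvStep acc) st
          (fun acc d hd => hGA acc d hd)]
        exact fold_const_fold A st (by rw [hAcons]; simp)
      rw [hAfold]
      -- the fold over B via the induction hypothesis
      have hlenB : B.length ≤ n := by
        have : A.length + B.length = (d0 :: T).length := by rw [← List.length_append, hS]
        have hA1 : 1 ≤ A.length := by rw [hAcons]; simp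
        simp only [List.length_cons] at this hlen
        omega
      exact ih B G hlenB hpB
        (fun d hd => by
          rw [hG d (by rw [← hS]; exact List.mem_append_right _ hd)]
          exact hfB d hd) _

-- sorting the date column equals the date column of the sorted records
lemma sorted_map_id (dates : List (List String)) :
    PySem.List.sorted (dates.map pvKey) (fun x => x) = (PySem.List.sorted dates pvKey).map pvKey :=
  PySem.List.sorted_id_eq_of_perm_of_pairwise _ _
    ((PySem.List.sorted_perm dates pvKey false).map pvKey)
    (PySem.List.sorted_map_key_pairwise dates pvKey)

-- the two ports agree on every input
lemma ports_eq (dates : List (List String)) :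
    order_dates dates = order_dates_alt dates := by
  rw [alt_eq_fold]
  unfold order_dates
  simp only [PySem.List.foldl_append_singleton_eq_map, List.nil_append]
  rw [sorted_map_id, List.foldl_map]
  have h1 : (fun (acc : List (List String) × List String) (d : List String) =>
      dates.foldl (fun acc2 e => if pvKey d = pvKey e then
          (if pvId e ∈ acc2.2 then acc2
           else (acc2.1 ++ [[pvId e, pvKey e]], acc2.2 ++ [pvId e])) else acc2) acc)
      = (fun acc d =>
          ((fun k => dates.filter (fun e => decide (k = pvKey e))) (pvKey d)).foldl pvStep acc) := by
    funext acc d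
    exact PySem.List.foldl_ite_eq_foldl_filter (fun e => pvKey d = pvKey e) pvStep dates acc
  rw [h1]
  exact congrArg Prod.fst
    (main_fold (PySem.List.sorted dates pvKey).length (PySem.List.sorted dates pvKey)
      (fun k => dates.filter (fun e => decide (k = pvKey e))) le_rfl
      (PySem.List.sorted_pairwise dates pvKey)
      (fun d _ => (sorted_filter_stable dates (pvKey d)).symm) ([], []))

-- ===== VERDICT (by name: the statement is the Claim_ definition above) =====
theorem order_dates_spec : Claim_equal_order_dates := by
  intro dates _ _
  unfold Spec_order_dates
  exact ports_eq dates
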